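-- pv_equiv track=rewrite | github.com/Theone029/Neurogen-3.0 | neurogen/reasoning/reasoning_engine.py | _generate_pattern_explanation
-- ===== SOURCE A (Python) =====
-- from typing import Dict, List, Any, Optional, Tuple, Callable
--
-- def _generate_pattern_explanation(observations: List[str]) -> Optional[str]:
--     """Generate pattern-based explanation from observations."""
--     if len(observations) < 2:
--         return None
--
--     # Check for time-based patterns
--     time_indicators = ["first", "then", "after", "before", "finally", "initially"]
--     has_temporal = False
--
--     for obs in observations:
--         if any(indicator in str(obs).lower() for indicator in time_indicators):
--             has_temporal = True
--             break
--
--     if has_temporal: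
--         return "Pattern shows a temporal sequence of events"
--
--     # Check for conditional patterns
--     conditional_indicators = ["if", "when", "unless", "only if"]
--     has_conditional = False
--
--     for obs in observations:
--         if any(indicator in str(obs).lower() for indicator in conditional_indicators):
--             has_conditional = True
--             break
--
--     if has_conditional:
--         return "Pattern shows conditional relationships"
--
--     return "No clear pattern identified in observations"
-- ===== SOURCE B (Python) =====
-- def _generate_pattern_explanation(observations):
--     """Generate pattern-based explanation from observations (single pass, two flags)."""
--     if len(observations) < 2:
--         return None
--
--     has_temporal = False
--     has_conditional = False
--     for obs in observations:
--         text = str(obs).lower()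
--         has_temporal = has_temporal or any(
--             k in text for k in ("first", "then", "after", "before", "finally", "initially"))
--         # "only if" is redundant: any text containing it already contains "if"
--         has_conditional = has_conditional or any(
--             k in text for k in ("if", "when", "unless"))
--
--     if has_temporal:
--         return "Pattern shows a temporal sequence of events"
--     if has_conditional:
--         return "Pattern shows conditional relationships"
--     return "No clear pattern identified in observations"
-- ===== Notes on version B (the rewrite author's own statement) =====
-- stated objective: simpler
-- what changed: Two separate early-break scans over the observations (temporal, then conditional) are replaced by one pass accumulating both flags, and the redundant 'only if' indicator (subsumed by 'if') is dropped.
import Mathlib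
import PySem

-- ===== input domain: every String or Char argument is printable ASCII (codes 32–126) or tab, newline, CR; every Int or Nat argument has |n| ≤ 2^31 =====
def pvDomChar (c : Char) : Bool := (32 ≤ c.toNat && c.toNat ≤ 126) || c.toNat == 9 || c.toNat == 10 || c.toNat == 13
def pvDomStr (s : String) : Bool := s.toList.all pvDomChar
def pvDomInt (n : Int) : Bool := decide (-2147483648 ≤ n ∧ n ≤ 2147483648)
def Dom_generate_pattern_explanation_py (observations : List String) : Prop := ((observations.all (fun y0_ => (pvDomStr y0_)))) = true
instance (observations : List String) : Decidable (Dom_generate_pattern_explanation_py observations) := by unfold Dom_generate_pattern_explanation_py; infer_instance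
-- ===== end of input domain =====

-- B: one pass over the observations accumulating both flags, with the redundant "only if" indicator dropped; objective: simpler.
-- ===== PORT A =====
def pvTimeIndicators : List String := ["first", "then", "after", "before", "finally", "initially"]
def pvCondIndicatorsA : List String := ["if", "when", "unless", "only if"]

-- A's early-break 'for obs in observations' loop setting a flag, as structural recursion
def pvScanA (inds : List String) : List String → Bool
  | [] => false
  | obs :: rest =>
    if inds.any (fun ind => PySem.Str.isIn ind (PySem.Str.lower obs)) then true
    else pvScanA inds rest

def generate_pattern_explanation_py (observations : List String) : Option String :=
  if observations.length < 2 then none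
  else if pvScanA pvTimeIndicators observations then
    some "Pattern shows a temporal sequence of events"
  else if pvScanA pvCondIndicatorsA observations then
    some "Pattern shows conditional relationships"
  else some "No clear pattern identified in observations"

-- ===== PORT B =====
def pvCondIndicatorsB : List String := ["if", "when", "unless"]

def generate_pattern_explanation_py_alt (observations : List String) : Option String :=
  if observations.length < 2 then none
  else
    let flags := observations.foldl
      (fun (fl : Bool × Bool) obs =>
        let text := PySem.Str.lower obs
        (fl.1 || pvTimeIndicators.any (fun k => PySem.Str.isIn k text),
         fl.2 || pvCondIndicatorsB.any (fun k => PySem.Str.isIn k text)))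
      (false, false)
    if flags.1 then some "Pattern shows a temporal sequence of events"
    else if flags.2 then some "Pattern shows conditional relationships"
    else some "No clear pattern identified in observations"

-- ===== PRECONDITION & SPEC =====
def Spec_generate_pattern_explanation_py (observations : List String) (out : Option String) : Prop := out = generate_pattern_explanation_py_alt observations
instance (observations : List String) (out : Option String) : Decidable (Spec_generate_pattern_explanation_py observations out) := by unfold Spec_generate_pattern_explanation_py; infer_instance

-- ===== CLAIM (what is proved, stated in full; the proofs are below) =====
def Claim_equal_generate_pattern_explanation_py : Prop := ∀ (observations : List String), Dom_generate_pattern_explanation_py observations → Spec_generate_pattern_explanation_py observations (generate_pattern_explanation_py observations)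

-- ===== LEMMAS AND PROOFS =====

-- "if" occurring in a text is implied by "only if" occurring in it
lemma pv_onlyif_imp_if (t : List Char) :
    PySem.Chars.isIn "only if".toList t = true →
    PySem.Chars.isIn "if".toList t = true := by
  rw [PySem.Chars.isIn_iff_infix, PySem.Chars.isIn_iff_infix]
  intro h
  exact List.IsInfix.trans (by decide) h

lemma pv_cond_eq (obs : String) :
    pvCondIndicatorsA.any (fun ind => PySem.Str.isIn ind (PySem.Str.lower obs)) =
    pvCondIndicatorsB.any (fun k => PySem.Str.isIn k (PySem.Str.lower obs)) := by
  simp only [pvCondIndicatorsA, pvCondIndicatorsB, List.any_cons, List.any_nil, Bool.or_false,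
    PySem.Str.isIn, PySem.Str.toList_lower]
  by_cases h : PySem.Chars.isIn "only if".toList (PySem.Chars.lower obs.toList) = true
  · have hif := pv_onlyif_imp_if _ h
    simp only [h, hif, Bool.true_or]
  · simp only [Bool.not_eq_true] at h
    simp only [h, Bool.or_false]

lemma pv_scanA_eq_any (inds : List String) (obs : List String) :
    pvScanA inds obs = obs.any (fun o => inds.any (fun ind => PySem.Str.isIn ind (PySem.Str.lower o))) := by
  induction obs with
  | nil => rfl
  | cons o rest ih =>
    rw [pvScanA, List.any_cons, ih]
    cases h : inds.any (fun ind => PySem.Str.isIn ind (PySem.Str.lower o)) <;> simp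

lemma pv_foldl_or (p : String → Bool) (l : List String) (b : Bool) :
    l.foldl (fun acc o => acc || p o) b = (b || l.any p) := by
  induction l generalizing b with
  | nil => simp
  | cons o rest ih => simp [ih, Bool.or_assoc]

lemma pv_fold_flags (obs : List String) :
    obs.foldl
      (fun (fl : Bool × Bool) obs =>
        let text := PySem.Str.lower obs
        (fl.1 || pvTimeIndicators.any (fun k => PySem.Str.isIn k text),
         fl.2 || pvCondIndicatorsB.any (fun k => PySem.Str.isIn k text)))
      (false, false) =
    (obs.any (fun o => pvTimeIndicators.any (fun k => PySem.Str.isIn k (PySem.Str.lower o))),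
     obs.any (fun o => pvCondIndicatorsB.any (fun k => PySem.Str.isIn k (PySem.Str.lower o)))) := by
  rw [PySem.List.foldl_prod_mk
    (f := fun acc o => acc || pvTimeIndicators.any (fun k => PySem.Str.isIn k (PySem.Str.lower o)))
    (g := fun acc o => acc || pvCondIndicatorsB.any (fun k => PySem.Str.isIn k (PySem.Str.lower o)))]
  simp only [pv_foldl_or, Bool.false_or]

-- ===== VERDICT (by name: the statement is the Claim_ definition above) =====
theorem generate_pattern_explanation_py_spec : Claim_equal_generate_pattern_explanation_py := by
  intro observations _
  unfold Spec_generate_pattern_explanation_py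
  unfold generate_pattern_explanation_py generate_pattern_explanation_py_alt
  by_cases hlen : observations.length < 2
  · rw [if_pos hlen, if_pos hlen]
  · rw [if_neg hlen, if_neg hlen]
    simp only [pv_fold_flags, pv_scanA_eq_any]
    rw [PySem.List.any_congr_mem (fun o _ => pv_cond_eq o)]
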